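-- pv_equiv track=rewrite | github.com/karljohanw/kjsong | tune/etcs2ly.py | volta
-- ===== SOURCE A (Python) =====
-- def kjw_index(s, c, *args, **kwargs):
--     try:
--         return s.index(c, *args, **kwargs)
--     except ValueError:
--         return -1
--
-- def to_max(i, length):
--     return i if i!=-1 else length
--
-- def volta(note, excl=False, idx=0, a='{', b='}', times=1):
--     l = len(note)
--     s = to_max(kjw_index(note, a,idx), l)
--     m = to_max(kjw_index(note, '|',idx), l)
--     e = to_max(kjw_index(note, b,idx), l)
--     if s==l and e==l:
--         return [n for n in note if not (n==a or n=='|' or n==b)]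
--     if s < m or s < e:
--         return volta(note, excl, s+1, a, b, times)
--     else:
--         return volta((note[:idx-1] + (times*([] if excl else [n for n in note[idx:e] if n!='|']) + note[idx:min(m,e)])) + note[e+1:], excl, 0, a, b, times)
-- ===== SOURCE B (Python) =====
-- # B: single left-to-right scan with an open-bracket buffer instead of A's
-- # repeated index-search-and-splice recursion; bracket-free inputs short-circuit to the strip.
-- def volta(note, excl=False, idx=0, a='{', b='}', times=1):
--     suffix = note[idx:]
--     if a not in suffix and b not in suffix:
--         return [n for n in note if not (n == a or n == '|' or n == b)]
--     out = []
--     body = None   # None = outside a bracket; else tokens collected (bars dropped)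
--     lead = None   # tokens collected before the first bar of the open bracket
--     bar = False
--     for t in note:
--         if body is None:
--             if t == a:
--                 body, lead, bar = [], [], False
--             elif t == '|' or t == b:
--                 pass
--             else:
--                 out.append(t)
--         else:
--             if t == b:
--                 out.extend(times * ([] if excl else body))
--                 out.extend(lead)
--                 body, lead = None, None
--             elif t == '|':
--                 bar = True
--             elif t == a:
--                 pass
--             else:
--                 body.append(t)
--                 if not bar:
--                     lead.append(t)
--     if body is not None:
--         out.extend(body)
--     return out
-- ===== Notes on version B (the rewrite author's own statement) =====
-- stated objective: alternative
-- what changed: Replaces A's recursive index-search-and-splice (repeatedly rescanning and rebuilding the list per bracket) with a single left-to-right scan that buffers the open bracket and emits each expansion once.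
-- outside the precondition, e.g. on volta(['x', '}'], False, 1, '{', '}', 2): A returns [], B returns ['x']; on volta(['}', 'x'], False, 0, '{', '}', 1): A raises RecursionError, B returns ['x']
import Mathlib
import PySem

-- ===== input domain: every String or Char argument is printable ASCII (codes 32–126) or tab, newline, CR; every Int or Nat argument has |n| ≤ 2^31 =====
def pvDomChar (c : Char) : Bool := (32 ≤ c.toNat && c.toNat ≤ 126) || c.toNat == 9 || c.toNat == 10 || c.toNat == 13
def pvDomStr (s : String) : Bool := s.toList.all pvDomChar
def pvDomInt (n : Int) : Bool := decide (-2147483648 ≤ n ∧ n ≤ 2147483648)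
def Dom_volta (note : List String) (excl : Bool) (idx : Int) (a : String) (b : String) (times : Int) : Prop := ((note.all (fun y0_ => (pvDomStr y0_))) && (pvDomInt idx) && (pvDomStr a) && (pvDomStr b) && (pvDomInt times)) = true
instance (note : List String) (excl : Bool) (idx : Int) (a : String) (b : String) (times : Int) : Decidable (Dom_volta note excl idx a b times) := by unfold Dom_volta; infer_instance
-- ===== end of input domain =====

-- B replaces A's recursive index-search-and-splice with one left-to-right scan that
-- buffers the open bracket and emits each expansion once (objective: alternative decomposition).

-- ===== PORT A =====

-- hand port of Python's list.index search (first occurrence): some offset or none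
def pvIdxSearch (c : String) : List String → Option Nat
  | [] => none
  | x :: r => if x == c then some 0 else (pvIdxSearch c r).map (· + 1)

-- exact port of kjw_index(s, c, start): Python clamps a negative start to max(l+start, 0)
-- and returns -1 when the element is absent (the caught ValueError)
def kjwIndex (s : List String) (c : String) (start : Int) : Int :=
  let st : Nat := if start < 0 then (s.length + start).toNat else start.toNat
  match pvIdxSearch c (s.drop st) with
  | some i => (st : Int) + (i : Int)
  | none => -1

def toMax (i l : Int) : Int := if i ≠ -1 then i else l

-- Python times*list (non-positive times gives [])
def pyMulList (n : Int) (xs : List String) : List String := (List.replicate n.toNat xs).flatten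

def voltaGo (excl : Bool) (a b : String) (times : Int) : Nat → List String → Int → List String
  | 0, _, _ => []
  | Nat.succ fuel, note, idx =>
    let l : Int := (note.length : Int)
    let s := toMax (kjwIndex note a idx) l
    let m := toMax (kjwIndex note "|" idx) l
    let e := toMax (kjwIndex note b idx) l
    if s = l ∧ e = l then
      note.filter (fun n => !(n == a || n == "|" || n == b))
    else if s < m ∨ s < e then
      voltaGo excl a b times fuel note (s + 1)
    else
      voltaGo excl a b times fuel
        (PySem.List.slice note none (some (idx - 1)) ++
          (pyMulList times (if excl then [] else (PySem.List.slice note (some idx) (some e)).filter (fun n => n != "|")) ++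
            PySem.List.slice note (some idx) (some (min m e))) ++
          PySem.List.slice note (some (e + 1)) none) 0

-- fuel ( (len+2)^2 ) strictly dominates the recursion depth on every input Pre_ admits
def volta (note : List String) (excl : Bool) (idx : Int) (a : String) (b : String) (times : Int) : List String :=
  voltaGo excl a b times ((note.length + 2) ^ 2) note idx

-- ===== PORT B =====

def scanGo (excl : Bool) (a b : String) (times : Int) : List String → Option (List String × List String × Bool) → List String
  | [], none => []
  | [], some (body, _, _) => body
  | t :: rest, none =>
    if t == a then scanGo excl a b times rest (some ([], [], false))
    else if t == "|" || t == b then scanGo excl a b times rest none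
    else t :: scanGo excl a b times rest none
  | t :: rest, some (body, lead, bar) =>
    if t == b then pyMulList times (if excl then [] else body) ++ lead ++ scanGo excl a b times rest none
    else if t == "|" then scanGo excl a b times rest (some (body, lead, true))
    else if t == a then scanGo excl a b times rest (some (body, lead, bar))
    else scanGo excl a b times rest (some (body ++ [t], if bar then lead else lead ++ [t], bar))

def volta_alt (note : List String) (excl : Bool) (idx : Int) (a : String) (b : String) (times : Int) : List String :=
  let suffix := PySem.List.slice note (some idx) none
  if !suffix.contains a && !suffix.contains b then
    note.filter (fun n => !(n == a || n == "|" || n == b))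
  else
    scanGo excl a b times note none

-- ===== PRECONDITION & SPEC =====

-- well-formedness automaton over the tokens: outside a bracket only `a` (opening) or plain
-- tokens may occur; inside only `b` (closing), '|' or plain tokens; brackets must close
def pvWf (a b : String) : Bool → List String → Bool
  | inside, [] => !inside
  | false, x :: r => if x == a then pvWf a b true r else if x == "|" || x == b then false else pvWf a b false r
  | true, x :: r => if x == b then pvWf a b false r else if x == a then false else pvWf a b true r

-- Pre_ admits every input without a closing token b (any idx), inputs whose searched
-- suffix contains neither delimiter, and well-formed flat volta sequences scanned from
-- idx = 0 with pairwise-distinct delimiters; it excludes malformed or nested bracket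
-- sequences and nonzero start indices into lists with a reachable closing token, where A
-- either recurses forever (e.g. volta(['}','x']) never returns) or returns accidental
-- values of the note[:idx-1] wraparound / nested re-expansion that B does not reproduce.
def Pre_volta (note : List String) (excl : Bool) (idx : Int) (a : String) (b : String) (times : Int) : Prop :=
  (b ∉ note) ∨
  (a ∉ note ∧ b ∉ PySem.List.slice note (some idx) none) ∨
  (idx = 0 ∧ a ≠ b ∧ a ≠ "|" ∧ b ≠ "|" ∧ pvWf a b false note = true)

instance (note : List String) (excl : Bool) (idx : Int) (a : String) (b : String) (times : Int) : Decidable (Pre_volta note excl idx a b times) := by unfold Pre_volta; infer_instance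

def pvWitness_volta : List String × Bool × Int × String × String × Int :=
  (["x", "{", "y", "|", "z", "}", "w"], false, 0, "{", "}", 2)

def Spec_volta (note : List String) (excl : Bool) (idx : Int) (a : String) (b : String) (times : Int) (out : List String) : Prop := out = volta_alt note excl idx a b times
instance (note : List String) (excl : Bool) (idx : Int) (a : String) (b : String) (times : Int) (out : List String) : Decidable (Spec_volta note excl idx a b times out) := by unfold Spec_volta; infer_instance

-- ===== CLAIM (what is proved, stated in full; the proofs are below) =====
def Claim_equal_volta : Prop := ∀ (note : List String) (excl : Bool) (idx : Int) (a : String) (b : String) (times : Int), Dom_volta note excl idx a b times → Pre_volta note excl idx a b times → Spec_volta note excl idx a b times (volta note excl idx a b times)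

-- ===== LEMMAS AND PROOFS =====

-- tokens that are neither delimiter nor bar
def pvPlain (a b : String) (xs : List String) : Prop := ∀ x ∈ xs, x ≠ a ∧ x ≠ "|" ∧ x ≠ b
-- bracket content: no delimiters (bars allowed)
def pvInner (a b : String) (xs : List String) : Prop := ∀ x ∈ xs, x ≠ a ∧ x ≠ b

-- equation helpers
theorem pvIdxSearch_cons_self (c : String) (T : List String) : pvIdxSearch c (c :: T) = some 0 := by
  simp [pvIdxSearch]

theorem pvIdxSearch_cons_ne {x c : String} (h : x ≠ c) (T : List String) :
    pvIdxSearch c (x :: T) = (pvIdxSearch c T).map (· + 1) := by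
  simp [pvIdxSearch, h]

theorem pvWf_cons_a {a b : String} (r : List String) :
    pvWf a b false (a :: r) = pvWf a b true r := by simp [pvWf]

theorem pvWf_cons_plain {a b x : String} (h1 : x ≠ a) (h2 : x ≠ "|") (h3 : x ≠ b)
    (r : List String) : pvWf a b false (x :: r) = pvWf a b false r := by
  simp [pvWf, h1, h2, h3]

theorem pvWf_cons_spec {a b x : String} (h1 : x ≠ a) (h2 : x = "|" ∨ x = b)
    (r : List String) : pvWf a b false (x :: r) = false := by
  rcases h2 with rfl | rfl <;> simp [pvWf, h1]

theorem pvWf_true_cons_b {a b : String} (r : List String) :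
    pvWf a b true (b :: r) = pvWf a b false r := by simp [pvWf]

theorem pvWf_true_cons_inner {a b x : String} (h1 : x ≠ a) (h2 : x ≠ b)
    (r : List String) : pvWf a b true (x :: r) = pvWf a b true r := by
  simp [pvWf, h1, h2]

theorem pvIdxSearch_none {c : String} {T : List String} (h : c ∉ T) : pvIdxSearch c T = none := by
  induction T with
  | nil => rfl
  | cons x r ih =>
    simp only [List.mem_cons, not_or] at h
    rw [pvIdxSearch_cons_ne (Ne.symm h.1), ih h.2]
    rfl

theorem pvIdxSearch_append {c : String} {X : List String} (T : List String) (h : c ∉ X) :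
    pvIdxSearch c (X ++ T) = (pvIdxSearch c T).map (· + X.length) := by
  induction X with
  | nil => simp
  | cons x r ih =>
    simp only [List.mem_cons, not_or] at h
    rw [List.cons_append, pvIdxSearch_cons_ne (Ne.symm h.1), ih h.2]
    cases pvIdxSearch c T <;> simp <;> omega

theorem pvIdxSearch_append_left {c : String} {C : List String} {k : Nat} (T : List String)
    (h : pvIdxSearch c C = some k) : pvIdxSearch c (C ++ T) = some k := by
  induction C generalizing k with
  | nil => simp [pvIdxSearch] at h
  | cons x r ih =>
    by_cases hx : x = c
    · subst hx
      rw [pvIdxSearch_cons_self] at h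
      rw [List.cons_append, pvIdxSearch_cons_self]
      exact h
    · rw [pvIdxSearch_cons_ne hx] at h
      obtain ⟨j, hj, rfl⟩ := Option.map_eq_some_iff.1 h
      rw [List.cons_append, pvIdxSearch_cons_ne hx, ih hj]
      rfl

theorem pvIdxSearch_lt {c : String} {T : List String} {k : Nat}
    (h : pvIdxSearch c T = some k) : k < T.length := by
  induction T generalizing k with
  | nil => simp [pvIdxSearch] at h
  | cons x r ih =>
    by_cases hx : x = c
    · subst hx; rw [pvIdxSearch_cons_self] at h
      obtain rfl : (0 : Nat) = k := by simpa using h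
      simp
    · rw [pvIdxSearch_cons_ne hx] at h
      obtain ⟨j, hj, rfl⟩ := Option.map_eq_some_iff.1 h
      have := ih hj; simp; omega

theorem pvIdxSearch_isSome {c : String} {T : List String} (h : c ∈ T) :
    ∃ k, pvIdxSearch c T = some k := by
  induction T with
  | nil => simp at h
  | cons x r ih =>
    by_cases hx : x = c
    · exact ⟨0, by rw [hx, pvIdxSearch_cons_self]⟩
    · have hr : c ∈ r := by
        rcases List.mem_cons.1 h with h1 | h1
        · exact absurd h1.symm hx
        · exact h1
      obtain ⟨k, hk⟩ := ih hr
      exact ⟨k + 1, by rw [pvIdxSearch_cons_ne hx, hk]; rfl⟩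

-- ===== automaton lemmas =====

theorem pvWf_plain {a b : String} {X : List String} (h : pvPlain a b X) :
    pvWf a b false X = true := by
  induction X with
  | nil => rfl
  | cons x r ih =>
    obtain ⟨h1, h2, h3⟩ := h x (List.mem_cons_self ..)
    rw [pvWf_cons_plain h1 h2 h3]
    exact ih (fun y hy => h y (List.mem_cons_of_mem _ hy))

theorem pvWf_no_a_plain {a b : String} {X : List String}
    (hw : pvWf a b false X = true) (hna : a ∉ X) : pvPlain a b X := by
  induction X with
  | nil => intro x hx; simp at hx
  | cons x r ih =>
    simp only [List.mem_cons, not_or] at hna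
    have hxa : x ≠ a := Ne.symm hna.1
    by_cases hsp : x = "|" ∨ x = b
    · rw [pvWf_cons_spec hxa hsp] at hw; simp at hw
    · push_neg at hsp
      rw [pvWf_cons_plain hxa hsp.1 hsp.2] at hw
      intro y hy
      rcases List.mem_cons.1 hy with rfl | hy
      · exact ⟨hxa, hsp.1, hsp.2⟩
      · exact ih hw hna.2 y hy

theorem pvWf_append {a b : String} {X : List String} :
    ∀ (st : Bool) (Y : List String), pvWf a b st X = true →
      pvWf a b st (X ++ Y) = pvWf a b false Y := by
  induction X with
  | nil =>
    intro st Y h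
    cases st
    · simp
    · simp [pvWf] at h
  | cons x r ih =>
    intro st Y h
    cases st
    · by_cases hxa : x = a
      · subst hxa
        rw [pvWf_cons_a] at h
        rw [List.cons_append, pvWf_cons_a]
        exact ih true Y h
      · by_cases hsp : x = "|" ∨ x = b
        · rw [pvWf_cons_spec hxa hsp] at h; simp at h
        · push_neg at hsp
          rw [pvWf_cons_plain hxa hsp.1 hsp.2] at h
          rw [List.cons_append, pvWf_cons_plain hxa hsp.1 hsp.2]
          exact ih false Y h
    · by_cases hxb : x = b
      · subst hxb
        rw [pvWf_true_cons_b] at h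
        rw [List.cons_append, pvWf_true_cons_b]
        exact ih false Y h
      · by_cases hxa : x = a
        · subst hxa; simp [pvWf, hxb] at h
        · rw [pvWf_true_cons_inner hxa hxb] at h
          rw [List.cons_append, pvWf_true_cons_inner hxa hxb]
          exact ih true Y h

theorem pvWf_inner_close {a b : String} {C : List String}
    (hC : pvInner a b C) : ∀ Y, pvWf a b true (C ++ b :: Y) = pvWf a b false Y := by
  induction C with
  | nil => intro Y; simp [pvWf_true_cons_b]
  | cons x r ih =>
    intro Y
    obtain ⟨h1, h2⟩ := hC x (List.mem_cons_self ..)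
    rw [List.cons_append, pvWf_true_cons_inner h1 h2]
    exact ih (fun y hy => hC y (List.mem_cons_of_mem _ hy)) Y

theorem pvWf_close_inv {a b : String} {T : List String} (hw : pvWf a b true T = true) :
    ∃ C R, T = C ++ b :: R ∧ pvInner a b C ∧ pvWf a b false R = true := by
  induction T with
  | nil => simp [pvWf] at hw
  | cons x r ih =>
    by_cases hxb : x = b
    · subst hxb
      rw [pvWf_true_cons_b] at hw
      exact ⟨[], r, by simp, by intro y hy; simp at hy, hw⟩
    · by_cases hxa : x = a
      · subst hxa; simp [pvWf, hxb] at hw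
      · rw [pvWf_true_cons_inner hxa hxb] at hw
        obtain ⟨C, R, rfl, hC, hR⟩ := ih hw
        refine ⟨x :: C, R, by simp, ?_, hR⟩
        intro y hy
        rcases List.mem_cons.1 hy with rfl | hy
        · exact ⟨hxa, hxb⟩
        · exact hC y hy

theorem pvWf_split {a b : String} {X : List String}
    (hw : pvWf a b false X = true) (ha : a ∈ X) :
    ∃ P C R, X = P ++ a :: (C ++ b :: R) ∧ pvPlain a b P ∧ pvInner a b C ∧
      pvWf a b false R = true := by
  induction X with
  | nil => simp at ha
  | cons x r ih =>
    by_cases hxa : x = a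
    · subst hxa
      rw [pvWf_cons_a] at hw
      obtain ⟨C, R, rfl, hC, hR⟩ := pvWf_close_inv hw
      exact ⟨[], C, R, by simp, by intro y hy; simp at hy, hC, hR⟩
    · have har : a ∈ r := by
        rcases List.mem_cons.1 ha with h1 | h1
        · exact absurd h1.symm hxa
        · exact h1
      by_cases hsp : x = "|" ∨ x = b
      · rw [pvWf_cons_spec hxa hsp] at hw; simp at hw
      · push_neg at hsp
        rw [pvWf_cons_plain hxa hsp.1 hsp.2] at hw
        obtain ⟨P, C, R, rfl, hP, hC, hR⟩ := ih hw har
        refine ⟨x :: P, C, R, by simp, ?_, hC, hR⟩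
        intro y hy
        rcases List.mem_cons.1 hy with rfl | hy
        · exact ⟨hxa, hsp.1, hsp.2⟩
        · exact hP y hy

theorem pvWf_bar_after_a {a b : String} (ha : a ≠ "|") {R : List String}
    (hw : pvWf a b false R = true) {ib : Nat} (hbar : pvIdxSearch "|" R = some ib) :
    ∃ ia, pvIdxSearch a R = some ia ∧ ia < ib := by
  induction R generalizing ib with
  | nil => simp [pvIdxSearch] at hbar
  | cons x r ih =>
    by_cases hxa : x = a
    · subst hxa
      rw [pvIdxSearch_cons_ne ha] at hbar
      obtain ⟨j, _, rfl⟩ := Option.map_eq_some_iff.1 hbar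
      exact ⟨0, pvIdxSearch_cons_self .., by omega⟩
    · by_cases hsp : x = "|" ∨ x = b
      · rw [pvWf_cons_spec hxa hsp] at hw; simp at hw
      · push_neg at hsp
        rw [pvWf_cons_plain hxa hsp.1 hsp.2] at hw
        rw [pvIdxSearch_cons_ne hsp.1] at hbar
        obtain ⟨j, hj, rfl⟩ := Option.map_eq_some_iff.1 hbar
        obtain ⟨ia, hia, hlt⟩ := ih hw hj
        exact ⟨ia + 1, by rw [pvIdxSearch_cons_ne hxa, hia]; rfl, by omega⟩

-- ===== list helpers =====

theorem pvTakeWhile_no_bar {C : List String} (h : "|" ∉ C) :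
    C.takeWhile (fun x => x != "|") = C := by
  induction C with
  | nil => rfl
  | cons x r ih =>
    simp only [List.mem_cons, not_or] at h
    simp [List.takeWhile_cons, Ne.symm h.1, ih h.2]

theorem pvTakeWhile_take {C : List String} {k : Nat} (h : pvIdxSearch "|" C = some k) :
    C.take k = C.takeWhile (fun x => x != "|") := by
  induction C generalizing k with
  | nil => simp [pvIdxSearch] at h
  | cons x r ih =>
    by_cases hx : x = "|"
    · subst hx
      rw [pvIdxSearch_cons_self] at h
      obtain rfl : (0 : Nat) = k := by simpa using h
      simp [List.takeWhile_cons]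
    · rw [pvIdxSearch_cons_ne hx] at h
      obtain ⟨j, hj, rfl⟩ := Option.map_eq_some_iff.1 h
      simp [List.takeWhile_cons, hx, List.take_succ_cons, ih hj]

theorem pvFilter_plain {a b : String} {X : List String} (h : pvPlain a b X) :
    X.filter (fun n => !(n == a || n == "|" || n == b)) = X := by
  rw [List.filter_eq_self]
  intro x hx
  obtain ⟨h1, h2, h3⟩ := h x hx
  simp [h1, h2, h3]

theorem pvMul_mem {x : String} {t : Int} {xs : List String} (h : x ∈ pyMulList t xs) :
    x ∈ xs := by
  unfold pyMulList at h
  obtain ⟨l, hl, hx⟩ := List.mem_flatten.1 h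
  rwa [List.eq_of_mem_replicate hl] at hx

-- ===== scan equation helpers =====

theorem scanGo_nil_none (excl : Bool) (a b : String) (times : Int) :
    scanGo excl a b times [] none = [] := rfl

theorem scanGo_cons_none_a (excl : Bool) (a b : String) (times : Int) (r : List String) :
    scanGo excl a b times (a :: r) none = scanGo excl a b times r (some ([], [], false)) := by
  simp [scanGo]

theorem scanGo_cons_none_drop {a b x : String} (excl : Bool) (times : Int)
    (h1 : x ≠ a) (h2 : x = "|" ∨ x = b) (r : List String) :
    scanGo excl a b times (x :: r) none = scanGo excl a b times r none := by
  rcases h2 with rfl | rfl <;> simp [scanGo, h1]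

theorem scanGo_cons_none_plain {a b x : String} (excl : Bool) (times : Int)
    (h1 : x ≠ a) (h2 : x ≠ "|") (h3 : x ≠ b) (r : List String) :
    scanGo excl a b times (x :: r) none = x :: scanGo excl a b times r none := by
  simp [scanGo, h1, h2, h3]

theorem scanGo_cons_some_b (excl : Bool) (a b : String) (times : Int)
    (bd ld : List String) (bar : Bool) (r : List String) :
    scanGo excl a b times (b :: r) (some (bd, ld, bar)) =
      pyMulList times (if excl then [] else bd) ++ ld ++ scanGo excl a b times r none := by
  simp [scanGo]

theorem scanGo_cons_some_bar {b : String} (excl : Bool) (a : String) (times : Int)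
    (hb : b ≠ "|") (bd ld : List String) (bar : Bool) (r : List String) :
    scanGo excl a b times ("|" :: r) (some (bd, ld, bar)) =
      scanGo excl a b times r (some (bd, ld, true)) := by
  simp [scanGo, Ne.symm hb]

theorem scanGo_cons_some_plain {a b x : String} (excl : Bool) (times : Int)
    (h1 : x ≠ a) (h2 : x ≠ "|") (h3 : x ≠ b) (bd ld : List String) (bar : Bool)
    (r : List String) :
    scanGo excl a b times (x :: r) (some (bd, ld, bar)) =
      scanGo excl a b times r (some (bd ++ [x], if bar then ld else ld ++ [x], bar)) := by
  simp [scanGo, h1, h2, h3]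

-- ===== scan structure lemmas =====

theorem scanGo_plain {a b : String} {P : List String} (excl : Bool) (times : Int)
    (h : pvPlain a b P) :
    ∀ Y, scanGo excl a b times (P ++ Y) none = P ++ scanGo excl a b times Y none := by
  induction P with
  | nil => intro Y; simp
  | cons x r ih =>
    intro Y
    obtain ⟨h1, h2, h3⟩ := h x (List.mem_cons_self ..)
    rw [List.cons_append, scanGo_cons_none_plain excl times h1 h2 h3,
      ih (fun y hy => h y (List.mem_cons_of_mem _ hy)) Y, List.cons_append]

theorem scanGo_id_plain {a b : String} {P : List String} (excl : Bool) (times : Int)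
    (h : pvPlain a b P) : scanGo excl a b times P none = P := by
  have := scanGo_plain excl times h []
  simpa [scanGo_nil_none] using this

theorem scanGo_close_true {a b : String} {C : List String} (excl : Bool) (times : Int)
    (hb : b ≠ "|") (hC : pvInner a b C) :
    ∀ Y bd ld, scanGo excl a b times (C ++ b :: Y) (some (bd, ld, true)) =
      pyMulList times (if excl then [] else bd ++ C.filter (fun x => x != "|")) ++ ld ++
        scanGo excl a b times Y none := by
  induction C with
  | nil =>
    intro Y bd ld
    simp [scanGo_cons_some_b]
  | cons x r ih =>
    intro Y bd ld
    obtain ⟨h1, h2⟩ := hC x (List.mem_cons_self ..)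
    have hC' : pvInner a b r := fun y hy => hC y (List.mem_cons_of_mem _ hy)
    by_cases hbar : x = "|"
    · subst hbar
      rw [List.cons_append, scanGo_cons_some_bar excl a times hb, ih hC' Y bd ld]
      simp
    · rw [List.cons_append, scanGo_cons_some_plain excl times h1 hbar h2, ih hC' Y]
      simp [List.filter_cons, hbar]

theorem scanGo_close_false {a b : String} {C : List String} (excl : Bool) (times : Int)
    (hb : b ≠ "|") (hC : pvInner a b C) :
    ∀ Y bd ld, scanGo excl a b times (C ++ b :: Y) (some (bd, ld, false)) =
      pyMulList times (if excl then [] else bd ++ C.filter (fun x => x != "|")) ++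
        (ld ++ C.takeWhile (fun x => x != "|")) ++ scanGo excl a b times Y none := by
  induction C with
  | nil =>
    intro Y bd ld
    simp [scanGo_cons_some_b]
  | cons x r ih =>
    intro Y bd ld
    obtain ⟨h1, h2⟩ := hC x (List.mem_cons_self ..)
    have hC' : pvInner a b r := fun y hy => hC y (List.mem_cons_of_mem _ hy)
    by_cases hbar : x = "|"
    · subst hbar
      rw [List.cons_append, scanGo_cons_some_bar excl a times hb,
        scanGo_close_true excl times hb hC' Y bd ld]
      simp [List.takeWhile_cons]
    · rw [List.cons_append, scanGo_cons_some_plain excl times h1 hbar h2, ih hC' Y]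
      simp [List.filter_cons, List.takeWhile_cons, hbar]

theorem scanGo_complete {a b : String} {X : List String} (excl : Bool) (times : Int)
    (hb : b ≠ "|") (hw : pvWf a b false X = true) :
    ∀ Y, scanGo excl a b times (X ++ Y) none =
      scanGo excl a b times X none ++ scanGo excl a b times Y none := by
  induction hn : X.length using Nat.strong_induction_on generalizing X with
  | _ n ih =>
  subst hn
  intro Y
  by_cases hmem : a ∈ X
  · obtain ⟨P, C, X₂, rfl, hP, hC, hX₂⟩ := pvWf_split hw hmem
    have hlen : X₂.length < (P ++ a :: (C ++ b :: X₂)).length := by simp; omega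
    have key : ∀ Z, scanGo excl a b times ((P ++ a :: (C ++ b :: X₂)) ++ Z) none =
        P ++ (pyMulList times (if excl then [] else [] ++ C.filter (fun x => x != "|")) ++
          ([] ++ C.takeWhile (fun x => x != "|")) ++ scanGo excl a b times (X₂ ++ Z) none) := by
      intro Z
      have e1 : (P ++ a :: (C ++ b :: X₂)) ++ Z = P ++ (a :: (C ++ b :: (X₂ ++ Z))) := by simp
      rw [e1, scanGo_plain excl times hP, scanGo_cons_none_a,
        scanGo_close_false excl times hb hC (X₂ ++ Z) [] []]
    have key2 := key []
    simp only [List.append_nil] at key2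
    rw [key Y, key2, ih X₂.length hlen hX₂ rfl Y]
    simp
  · have hP := pvWf_no_a_plain hw hmem
    rw [scanGo_plain excl times hP Y, scanGo_id_plain excl times hP]

-- ===== A-side computation helpers =====

theorem pvIdxSearch_mem_of_some {c : String} {T : List String} {k : Nat}
    (h : pvIdxSearch c T = some k) : c ∈ T := by
  induction T generalizing k with
  | nil => simp [pvIdxSearch] at h
  | cons x r ih =>
    by_cases hx : x = c
    · simp [hx]
    · rw [pvIdxSearch_cons_ne hx] at h
      obtain ⟨j, hj, rfl⟩ := Option.map_eq_some_iff.1 h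
      exact List.mem_cons_of_mem _ (ih hj)

theorem kjwIndex_drop_some {s T : List String} {n : Nat} {c : String} {i : Nat}
    (hd : s.drop n = T) (hs : pvIdxSearch c T = some i) :
    kjwIndex s c (n : Int) = ((n + i : Nat) : Int) := by
  unfold kjwIndex
  have h1 : ¬ ((n : Int) < 0) := by omega
  simp only [h1, if_false, Int.toNat_natCast, hd, hs]
  push_cast
  ring

theorem kjwIndex_drop_none {s T : List String} {n : Nat} {c : String}
    (hd : s.drop n = T) (hs : pvIdxSearch c T = none) :
    kjwIndex s c (n : Int) = -1 := by
  unfold kjwIndex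
  have h1 : ¬ ((n : Int) < 0) := by omega
  simp only [h1, if_false, Int.toNat_natCast, hd, hs]

theorem kjwIndex_notmem {s : List String} {c : String} (h : c ∉ s) (i : Int) :
    kjwIndex s c i = -1 := by
  unfold kjwIndex
  have : c ∉ s.drop (if i < 0 then (↑s.length + i).toNat else i.toNat) :=
    fun hm => h (List.drop_subset _ _ hm)
  simp only [pvIdxSearch_none this]

theorem toMax_natCast (k : Nat) (l : Int) : toMax ((k : Nat) : Int) l = k := by
  unfold toMax
  have : ((k : Nat) : Int) ≠ -1 := by omega
  simp [this]

theorem toMax_neg (l : Int) : toMax (-1) l = l := by simp [toMax]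

theorem voltaGo_succ (excl : Bool) (a b : String) (times : Int) (fuel : Nat)
    (note : List String) (idx : Int) :
    voltaGo excl a b times (fuel + 1) note idx =
      if toMax (kjwIndex note a idx) (note.length : Int) = (note.length : Int) ∧
         toMax (kjwIndex note b idx) (note.length : Int) = (note.length : Int) then
        note.filter (fun n => !(n == a || n == "|" || n == b))
      else if toMax (kjwIndex note a idx) (note.length : Int) < toMax (kjwIndex note "|" idx) (note.length : Int) ∨
              toMax (kjwIndex note a idx) (note.length : Int) < toMax (kjwIndex note b idx) (note.length : Int) then
        voltaGo excl a b times fuel note (toMax (kjwIndex note a idx) (note.length : Int) + 1)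
      else
        voltaGo excl a b times fuel
          (PySem.List.slice note none (some (idx - 1)) ++
            (pyMulList times (if excl then [] else (PySem.List.slice note (some idx) (some (toMax (kjwIndex note b idx) (note.length : Int)))).filter (fun n => n != "|")) ++
              PySem.List.slice note (some idx) (some (min (toMax (kjwIndex note "|" idx) (note.length : Int)) (toMax (kjwIndex note b idx) (note.length : Int))))) ++
            PySem.List.slice note (some (toMax (kjwIndex note b idx) (note.length : Int) + 1)) none) 0 := rfl

-- ===== expansion step facts =====

theorem pvPlain_E {a b : String} {C : List String} (hC : pvInner a b C)
    (excl : Bool) (times : Int) :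
    pvPlain a b (pyMulList times (if excl then [] else C.filter (fun x => x != "|")) ++
      C.takeWhile (fun x => x != "|")) := by
  intro x hx
  rcases List.mem_append.1 hx with hx | hx
  · have hx' := pvMul_mem hx
    by_cases he : excl
    · simp [he] at hx'
    · simp only [he, if_false] at hx'
      obtain ⟨h1, h2⟩ := List.mem_filter.1 hx'
      exact ⟨(hC x h1).1, by simpa using h2, (hC x h1).2⟩
  · have h1 : x ∈ C := (List.takeWhile_sublist _).subset hx
    exact ⟨(hC x h1).1, by simpa using List.mem_takeWhile_imp hx, (hC x h1).2⟩

theorem pvExpand_wf {a b : String} {X C R : List String}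
    (hX : pvWf a b false X = true) (hC : pvInner a b C) (hR : pvWf a b false R = true)
    (excl : Bool) (times : Int) :
    pvWf a b false (X ++ ((pyMulList times (if excl then [] else C.filter (fun x => x != "|")) ++
      C.takeWhile (fun x => x != "|")) ++ R)) = true := by
  rw [pvWf_append false _ hX, pvWf_append false _ (pvWf_plain (pvPlain_E hC excl times)), hR]

theorem pvExpand_count {a b : String} {X C R : List String} (hab : a ≠ b)
    (hC : pvInner a b C) (excl : Bool) (times : Int) :
    (X ++ ((pyMulList times (if excl then [] else C.filter (fun x => x != "|")) ++
      C.takeWhile (fun x => x != "|")) ++ R)).count a + 1 =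
      (X ++ a :: (C ++ b :: R)).count a := by
  have hEc : (pyMulList times (if excl then [] else C.filter (fun x => x != "|")) ++
      C.takeWhile (fun x => x != "|")).count a = 0 :=
    List.count_eq_zero.2 (fun h => (pvPlain_E hC excl times a h).1 rfl)
  have hCc : C.count a = 0 := List.count_eq_zero.2 (fun h => (hC a h).1 rfl)
  rw [List.count_append] at hEc
  simp [List.count_append, List.count_cons, hCc, Ne.symm hab]
  omega

theorem pvExpand_scan {a b : String} {X C R : List String}
    (hb : b ≠ "|")
    (hX : pvWf a b false X = true) (hC : pvInner a b C)
    (excl : Bool) (times : Int) :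
    scanGo excl a b times (X ++ ((pyMulList times (if excl then [] else C.filter (fun x => x != "|")) ++
        C.takeWhile (fun x => x != "|")) ++ R)) none =
      scanGo excl a b times (X ++ a :: (C ++ b :: R)) none := by
  rw [scanGo_complete excl times hb hX, scanGo_complete excl times hb hX]
  congr 1
  rw [scanGo_plain excl times (pvPlain_E hC excl times) R,
    scanGo_cons_none_a, scanGo_close_false excl times hb hC R [] []]
  simp

-- ===== main induction =====

theorem volta_go_main (excl : Bool) (a b : String) (times : Int)
    (ha : a ≠ "|") (hb : b ≠ "|") (hab : a ≠ b) :
    ∀ (μ : Nat), ∀ (fuel : Nat) (note : List String) (idx : Int),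
      ((idx = 0 ∧ pvWf a b false note = true) ∨
        (∃ X C R, note = X ++ a :: (C ++ b :: R) ∧ idx = (X.length : Int) + 1 ∧
          pvWf a b false X = true ∧ pvInner a b C ∧ pvWf a b false R = true)) →
      note.count a * (note.count a + 1) +
        (if idx = 0 then note.count a + 1 else (note.drop idx.toNat).count a) ≤ μ →
      μ < fuel →
      voltaGo excl a b times fuel note idx = scanGo excl a b times note none := by
  intro μ
  induction μ using Nat.strong_induction_on with
  | _ μ ih =>
  intro fuel note idx hst hμ hfuel
  obtain ⟨f, rfl⟩ : ∃ f, fuel = f + 1 := ⟨fuel - 1, by omega⟩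
  rcases hst with ⟨rfl, hwf⟩ | ⟨X, C, R, rfl, rfl, hX, hC, hR⟩
  · -- idx = 0
    have hμ' : note.count a * (note.count a + 1) + (note.count a + 1) ≤ μ := by
      simpa using hμ
    by_cases hmem : a ∈ note
    · have hn1 : 1 ≤ note.count a := List.count_pos_iff.2 hmem
      obtain ⟨P, C, R, rfl, hP, hC, hR⟩ := pvWf_split hwf hmem
      have haP : a ∉ P := fun h => (hP a h).1 rfl
      have haC : a ∉ C := fun h => (hC a h).1 rfl
      have hbC : b ∉ C := fun h => (hC b h).2 rfl
      have hPc : P.count a = 0 := List.count_eq_zero.2 haP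
      have hCc : C.count a = 0 := List.count_eq_zero.2 haC
      have hsS : pvIdxSearch a (P ++ a :: (C ++ b :: R)) = some P.length := by
        rw [pvIdxSearch_append _ haP, pvIdxSearch_cons_self]
        simp
      have hd0 : (P ++ a :: (C ++ b :: R)).drop 0 = P ++ a :: (C ++ b :: R) := rfl
      have hkS : kjwIndex (P ++ a :: (C ++ b :: R)) a 0 = ((P.length : Nat) : Int) := by
        rw [show (0 : Int) = ((0 : Nat) : Int) by simp, kjwIndex_drop_some hd0 hsS]
        simp
      have hlen : (P ++ a :: (C ++ b :: R)).length = P.length + 1 + C.length + 1 + R.length := by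
        simp; omega
      rw [voltaGo_succ, hkS, toMax_natCast]
      have hbr1 : ¬(((P.length : Nat) : Int) = ((P ++ a :: (C ++ b :: R)).length : Int) ∧
          toMax (kjwIndex (P ++ a :: (C ++ b :: R)) b 0) ((P ++ a :: (C ++ b :: R)).length : Int) =
            ((P ++ a :: (C ++ b :: R)).length : Int)) := by
        rintro ⟨h1, -⟩
        rw [hlen] at h1
        omega
      rw [if_neg hbr1]
      have hbr2 : ((P.length : Nat) : Int) <
          toMax (kjwIndex (P ++ a :: (C ++ b :: R)) b 0) ((P ++ a :: (C ++ b :: R)).length : Int) := by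
        have hbPC : b ∉ P ++ a :: C := by
          intro h
          rcases List.mem_append.1 h with h | h
          · exact (hP b h).2.2 rfl
          · rcases List.mem_cons.1 h with h | h
            · exact hab h.symm
            · exact (hC b h).2 rfl
        have heS : pvIdxSearch b (P ++ a :: (C ++ b :: R)) = some (P.length + 1 + C.length) := by
          have e1 : P ++ a :: (C ++ b :: R) = (P ++ a :: C) ++ b :: R := by simp
          rw [e1, pvIdxSearch_append _ hbPC, pvIdxSearch_cons_self]
          simp; omega
        rw [show (0 : Int) = ((0 : Nat) : Int) by simp, kjwIndex_drop_some hd0 heS, toMax_natCast]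
        omega
      rw [if_pos (Or.inr hbr2)]
      have hdP : (P ++ a :: (C ++ b :: R)).drop (P.length + 1) = C ++ b :: R := by
        have e1 : P ++ a :: (C ++ b :: R) = (P ++ [a]) ++ (C ++ b :: R) := by simp
        rw [e1, List.drop_left']
        simp
      have hcnt : (P ++ a :: (C ++ b :: R)).count a = R.count a + 1 := by
        simp [List.count_append, List.count_cons, hPc, hCc, Ne.symm hab]
      have hnz : ¬(((P.length : Nat) : Int) + 1 = 0) := by omega
      have htn : (((P.length : Nat) : Int) + 1).toNat = P.length + 1 := by omega
      have hRc : (C ++ b :: R).count a = R.count a := by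
        simp [List.count_append, List.count_cons, hCc, Ne.symm hab]
      rw [hcnt] at hμ' hn1
      apply ih (μ - 2) (by omega) f _ _
        (Or.inr ⟨P, C, R, rfl, by push_cast; ring, pvWf_plain hP, hC, hR⟩)
      · rw [if_neg hnz, htn, hdP, hRc, hcnt]
        omega
      · omega
    · -- a ∉ note : first branch, both sides strip/are the identity
      have hPl := pvWf_no_a_plain hwf hmem
      have hbm : b ∉ note := fun h => (hPl b h).2.2 rfl
      rw [voltaGo_succ, kjwIndex_notmem hmem 0, kjwIndex_notmem hbm 0, toMax_neg]
      rw [if_pos ⟨rfl, rfl⟩, pvFilter_plain hPl, scanGo_id_plain excl times hPl]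
  · -- idx = X.length + 1 : inside the searched bracket
    have haC : a ∉ C := fun h => (hC a h).1 rfl
    have hbC : b ∉ C := fun h => (hC b h).2 rfl
    have hCc : C.count a = 0 := List.count_eq_zero.2 haC
    have hXa : (X ++ a :: (C ++ b :: R)) = (X ++ [a]) ++ (C ++ b :: R) := by simp
    have hdT : (X ++ a :: (C ++ b :: R)).drop (X.length + 1) = C ++ b :: R := by
      rw [hXa, List.drop_left']
      simp
    have hcast : ((X.length : Nat) : Int) + 1 = ((X.length + 1 : Nat) : Int) := by push_cast; ring
    have hlen : (X ++ a :: (C ++ b :: R)).length = X.length + 1 + C.length + 1 + R.length := by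
      simp; omega
    have heS : pvIdxSearch b (C ++ b :: R) = some C.length := by
      rw [pvIdxSearch_append _ hbC, pvIdxSearch_cons_self]
      simp
    have hkE : kjwIndex (X ++ a :: (C ++ b :: R)) b (((X.length : Nat) : Int) + 1) =
        ((X.length + 1 + C.length : Nat) : Int) := by
      rw [hcast, kjwIndex_drop_some hdT heS]
    have hsplit : pvIdxSearch a (C ++ b :: R) = (pvIdxSearch a R).map (· + (C.length + 1)) := by
      rw [pvIdxSearch_append _ haC, pvIdxSearch_cons_ne (Ne.symm hab)]
      cases pvIdxSearch a R <;> simp <;> omega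
    have hmsplit : "|" ∉ C → pvIdxSearch "|" (C ++ b :: R) = (pvIdxSearch "|" R).map (· + (C.length + 1)) := by
      intro hbarC
      rw [pvIdxSearch_append _ hbarC, pvIdxSearch_cons_ne hb]
      cases pvIdxSearch "|" R <;> simp <;> omega
    have hcnt : (X ++ a :: (C ++ b :: R)).count a = X.count a + R.count a + 1 := by
      simp [List.count_append, List.count_cons, hCc, Ne.symm hab]
      omega
    have hμdrop : ((((X.length : Nat) : Int) + 1)).toNat = X.length + 1 := by omega
    have hnz : ¬(((X.length : Nat) : Int) + 1 = 0) := by omega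
    rw [voltaGo_succ, hkE, toMax_natCast]
    have hbr1 : ¬(toMax (kjwIndex (X ++ a :: (C ++ b :: R)) a (((X.length : Nat) : Int) + 1))
          ((X ++ a :: (C ++ b :: R)).length : Int) = ((X ++ a :: (C ++ b :: R)).length : Int) ∧
        ((X.length + 1 + C.length : Nat) : Int) = ((X ++ a :: (C ++ b :: R)).length : Int)) := by
      rintro ⟨-, h2⟩
      rw [hlen] at h2
      omega
    rw [if_neg hbr1]
    have hμ2 : (X ++ a :: (C ++ b :: R)).count a * ((X ++ a :: (C ++ b :: R)).count a + 1) +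
        R.count a ≤ μ := by
      rw [if_neg hnz, hμdrop, hdT] at hμ
      have hTc : (C ++ b :: R).count a = R.count a := by
        simp [List.count_append, List.count_cons, hCc, Ne.symm hab]
      rwa [hTc] at hμ
    have hn1 : 1 ≤ (X ++ a :: (C ++ b :: R)).count a := List.count_pos_iff.2 (by simp)
    -- slice facts shared by both expansion cases
    have hS1 : PySem.List.slice (X ++ a :: (C ++ b :: R)) none (some (((X.length : Nat) : Int) + 1 - 1)) = X := by
      have e1 : (((X.length : Nat) : Int) + 1 - 1) = ((X.length : Nat) : Int) := by ring
      rw [e1, PySem.List.slice_to_natCast]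
      exact List.take_left
    have hS2 : PySem.List.slice (X ++ a :: (C ++ b :: R)) (some (((X.length : Nat) : Int) + 1))
        (some ((X.length + 1 + C.length : Nat) : Int)) = C := by
      have e1 : ((X.length + 1 + C.length : Nat) : Int) =
          ((X.length + 1 : Nat) : Int) + ((C.length : Nat) : Int) := by push_cast; ring
      rw [hcast, e1, PySem.List.slice_natCast_add, hdT]
      exact List.take_left
    have hS4 : PySem.List.slice (X ++ a :: (C ++ b :: R))
        (some (((X.length + 1 + C.length : Nat) : Int) + 1)) none = R := by
      have e1 : (((X.length + 1 + C.length : Nat) : Int) + 1) =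
          ((X.length + 1 + C.length + 1 : Nat) : Int) := by push_cast; ring
      rw [e1, PySem.List.slice_from_natCast]
      have e2 : X ++ a :: (C ++ b :: R) = (X ++ a :: (C ++ [b])) ++ R := by simp
      rw [e2, List.drop_left' (by simp; omega)]
    by_cases hbarC : "|" ∈ C
    · -- a bar inside the current bracket: the expansion branch fires with min m e = m
      obtain ⟨k, hk⟩ := pvIdxSearch_isSome hbarC
      have hkC : k < C.length := pvIdxSearch_lt hk
      have hmS : pvIdxSearch "|" (C ++ b :: R) = some k := pvIdxSearch_append_left _ hk
      have hkM : kjwIndex (X ++ a :: (C ++ b :: R)) "|" (((X.length : Nat) : Int) + 1) =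
          ((X.length + 1 + k : Nat) : Int) := by
        rw [hcast, kjwIndex_drop_some hdT hmS]
      rw [hkM, toMax_natCast]
      have hsfact : ¬(toMax (kjwIndex (X ++ a :: (C ++ b :: R)) a (((X.length : Nat) : Int) + 1))
            ((X ++ a :: (C ++ b :: R)).length : Int) < ((X.length + 1 + k : Nat) : Int) ∨
          toMax (kjwIndex (X ++ a :: (C ++ b :: R)) a (((X.length : Nat) : Int) + 1))
            ((X ++ a :: (C ++ b :: R)).length : Int) < ((X.length + 1 + C.length : Nat) : Int)) := by
        cases hra : pvIdxSearch a R with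
        | none =>
          have hnone : pvIdxSearch a (C ++ b :: R) = none := by rw [hsplit, hra]; rfl
          rw [hcast, kjwIndex_drop_none hdT hnone, toMax_neg, hlen]
          push_cast
          omega
        | some ia =>
          have hsome : pvIdxSearch a (C ++ b :: R) = some (ia + (C.length + 1)) := by
            rw [hsplit, hra]; rfl
          rw [hcast, kjwIndex_drop_some hdT hsome, toMax_natCast]
          push_cast
          omega
      rw [if_neg hsfact]
      have hmin : min ((X.length + 1 + k : Nat) : Int) ((X.length + 1 + C.length : Nat) : Int) =
          ((X.length + 1 + k : Nat) : Int) := min_eq_left (by push_cast; omega)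
      have hS3 : PySem.List.slice (X ++ a :: (C ++ b :: R)) (some (((X.length : Nat) : Int) + 1))
          (some ((X.length + 1 + k : Nat) : Int)) = C.takeWhile (fun x => x != "|") := by
        have e1 : ((X.length + 1 + k : Nat) : Int) =
            ((X.length + 1 : Nat) : Int) + ((k : Nat) : Int) := by push_cast; ring
        rw [hcast, e1, PySem.List.slice_natCast_add, hdT,
          List.take_append_of_le_length (by omega), pvTakeWhile_take hk]
      rw [hmin, hS1, hS2, hS3, hS4, List.append_assoc]
      have hcnt' := pvExpand_count (X := X) (R := R) hab hC excl times
      calc voltaGo excl a b times f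
            (X ++ ((pyMulList times (if excl then [] else C.filter (fun x => x != "|")) ++
              C.takeWhile (fun x => x != "|")) ++ R)) 0
          = scanGo excl a b times (X ++ ((pyMulList times (if excl then [] else C.filter (fun x => x != "|")) ++
              C.takeWhile (fun x => x != "|")) ++ R)) none := by
            set E := pyMulList times (if excl then [] else C.filter (fun x => x != "|")) ++
              C.takeWhile (fun x => x != "|") with hE
            set n' := (X ++ (E ++ R)).count a with hn'
            have hn : (X ++ a :: (C ++ b :: R)).count a = n' + 1 := by omega
            rw [hn] at hμ2
            have hkey : (n' + 1) * (n' + 1 + 1) = n' * (n' + 1) + (n' + 1) + (n' + 1) := by ring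
            apply ih (n' * (n' + 1) + (n' + 1)) (by omega) f _ 0
              (Or.inl ⟨rfl, pvExpand_wf hX hC hR excl times⟩)
            · rw [if_pos rfl]
            · omega
        _ = scanGo excl a b times (X ++ a :: (C ++ b :: R)) none :=
            pvExpand_scan hb hX hC excl times
    · -- no bar in the current bracket
      cases hra : pvIdxSearch a R with
      | some ia =>
        -- another opening bracket follows: skip past it
        have hiaR : ia < R.length := pvIdxSearch_lt hra
        have hsome : pvIdxSearch a (C ++ b :: R) = some (ia + (C.length + 1)) := by
          rw [hsplit, hra]; rfl
        have hkS : kjwIndex (X ++ a :: (C ++ b :: R)) a (((X.length : Nat) : Int) + 1) =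
            ((X.length + 1 + (ia + (C.length + 1)) : Nat) : Int) := by
          rw [hcast, kjwIndex_drop_some hdT hsome]
        rw [hkS, toMax_natCast]
        have hskip : ((X.length + 1 + (ia + (C.length + 1)) : Nat) : Int) <
            toMax (kjwIndex (X ++ a :: (C ++ b :: R)) "|" (((X.length : Nat) : Int) + 1))
              ((X ++ a :: (C ++ b :: R)).length : Int) ∨
            ((X.length + 1 + (ia + (C.length + 1)) : Nat) : Int) <
              ((X.length + 1 + C.length : Nat) : Int) := by
          left
          cases hrb : pvIdxSearch "|" R with
          | none =>
            have hnone : pvIdxSearch "|" (C ++ b :: R) = none := by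
              rw [hmsplit hbarC, hrb]; rfl
            rw [hcast, kjwIndex_drop_none hdT hnone, toMax_neg, hlen]
            push_cast
            omega
          | some ib =>
            obtain ⟨ia', hia', hlt⟩ := pvWf_bar_after_a ha hR hrb
            rw [hra] at hia'
            obtain rfl : ia = ia' := by injection hia'
            have hsome2 : pvIdxSearch "|" (C ++ b :: R) = some (ib + (C.length + 1)) := by
              rw [hmsplit hbarC, hrb]; rfl
            rw [hcast, kjwIndex_drop_some hdT hsome2, toMax_natCast]
            push_cast
            omega
        rw [if_pos hskip]
        -- decompose R at its first opening bracket
        have hmemR : a ∈ R := pvIdxSearch_mem_of_some hra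
        obtain ⟨P', C', R', rfl, hP', hC', hR'⟩ := pvWf_split hR hmemR
        have haP' : a ∉ P' := fun h => (hP' a h).1 rfl
        have hiafst : pvIdxSearch a (P' ++ a :: (C' ++ b :: R')) = some P'.length := by
          rw [pvIdxSearch_append _ haP', pvIdxSearch_cons_self]
          simp
        obtain rfl : ia = P'.length := by
          rw [hiafst] at hra
          injection hra with h
          exact h.symm
        have hC'c : C'.count a = 0 := List.count_eq_zero.2 (fun h => (hC' a h).1 rfl)
        have hP'c : P'.count a = 0 := List.count_eq_zero.2 haP'
        have hXeq : X ++ a :: (C ++ b :: (P' ++ a :: (C' ++ b :: R'))) =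
            (X ++ a :: (C ++ b :: P')) ++ a :: (C' ++ b :: R') := by simp
        have hwfX' : pvWf a b false (X ++ a :: (C ++ b :: P')) = true := by
          have e1 : X ++ a :: (C ++ b :: P') = X ++ (a :: (C ++ b :: P')) := rfl
          rw [e1, pvWf_append false _ hX, pvWf_cons_a, pvWf_inner_close hC, pvWf_plain hP']
        have hd' : ((X ++ a :: (C ++ b :: P')) ++ a :: (C' ++ b :: R')).drop
            ((X ++ a :: (C ++ b :: P')).length + 1) = C' ++ b :: R' := by
          have e1 : (X ++ a :: (C ++ b :: P')) ++ a :: (C' ++ b :: R') =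
              ((X ++ a :: (C ++ b :: P')) ++ [a]) ++ (C' ++ b :: R') := by simp
          rw [e1, List.drop_left' (by simp; omega)]
        rw [hXeq]
        have hcnt2 : ((X ++ a :: (C ++ b :: P')) ++ a :: (C' ++ b :: R')).count a =
            (X ++ a :: (C ++ b :: (P' ++ a :: (C' ++ b :: R')))).count a := by
          rw [hXeq]
        have hRcnt : R'.count a + 1 = (P' ++ a :: (C' ++ b :: R')).count a := by
          simp [List.count_append, List.count_cons, hC'c, hP'c, Ne.symm hab]
        apply ih ((X ++ a :: (C ++ b :: (P' ++ a :: (C' ++ b :: R')))).count a *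
            ((X ++ a :: (C ++ b :: (P' ++ a :: (C' ++ b :: R')))).count a + 1) + R'.count a)
          (by omega) f _ _
          (Or.inr ⟨X ++ a :: (C ++ b :: P'), C', R', rfl, by push_cast; simp; omega, hwfX', hC', hR'⟩)
        · have hnz2 : ¬(((X.length + 1 + (P'.length + (C.length + 1)) : Nat) : Int) + 1 = 0) := by
            omega
          rw [if_neg hnz2, hcnt2]
          have htn2 : ((((X.length + 1 + (P'.length + (C.length + 1)) : Nat) : Int) + 1)).toNat =
              (X ++ a :: (C ++ b :: P')).length + 1 := by simp; omega
          rw [htn2, hd']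
          have hTc' : (C' ++ b :: R').count a = R'.count a := by
            simp [List.count_append, List.count_cons, hC'c, Ne.symm hab]
          rw [hTc']
        · omega
      | none =>
        -- last bracket: expansion fires with min m e = e
        have hnoneS : pvIdxSearch a (C ++ b :: R) = none := by rw [hsplit, hra]; rfl
        have hkS : kjwIndex (X ++ a :: (C ++ b :: R)) a (((X.length : Nat) : Int) + 1) = -1 := by
          rw [hcast, kjwIndex_drop_none hdT hnoneS]
        have hbarR : pvIdxSearch "|" R = none := by
          cases hrb : pvIdxSearch "|" R with
          | none => rfl
          | some ib =>
            obtain ⟨ia', hia', -⟩ := pvWf_bar_after_a ha hR hrb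
            rw [hra] at hia'
            cases hia'
        have hmnone : pvIdxSearch "|" (C ++ b :: R) = none := by
          rw [hmsplit hbarC, hbarR]; rfl
        have hkM : kjwIndex (X ++ a :: (C ++ b :: R)) "|" (((X.length : Nat) : Int) + 1) = -1 := by
          rw [hcast, kjwIndex_drop_none hdT hmnone]
        rw [hkS, hkM, toMax_neg]
        have hnoskip : ¬(((X ++ a :: (C ++ b :: R)).length : Int) <
              ((X ++ a :: (C ++ b :: R)).length : Int) ∨
            ((X ++ a :: (C ++ b :: R)).length : Int) < ((X.length + 1 + C.length : Nat) : Int)) := by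
          rw [hlen]
          push_cast
          omega
        rw [if_neg hnoskip]
        have hmin : min ((X ++ a :: (C ++ b :: R)).length : Int)
            ((X.length + 1 + C.length : Nat) : Int) = ((X.length + 1 + C.length : Nat) : Int) :=
          min_eq_right (by rw [hlen]; push_cast; omega)
        have hS3 : PySem.List.slice (X ++ a :: (C ++ b :: R)) (some (((X.length : Nat) : Int) + 1))
            (some (min ((X ++ a :: (C ++ b :: R)).length : Int) ((X.length + 1 + C.length : Nat) : Int))) =
            C.takeWhile (fun x => x != "|") := by
          rw [hmin, hS2]
          exact (pvTakeWhile_no_bar hbarC).symm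
        rw [hS3, hS1, hS2, hS4, List.append_assoc]
        have hcnt' := pvExpand_count (X := X) (R := R) hab hC excl times
        calc voltaGo excl a b times f
              (X ++ ((pyMulList times (if excl then [] else C.filter (fun x => x != "|")) ++
                C.takeWhile (fun x => x != "|")) ++ R)) 0
            = scanGo excl a b times (X ++ ((pyMulList times (if excl then [] else C.filter (fun x => x != "|")) ++
                C.takeWhile (fun x => x != "|")) ++ R)) none := by
              set E := pyMulList times (if excl then [] else C.filter (fun x => x != "|")) ++
                C.takeWhile (fun x => x != "|") with hE
              set n' := (X ++ (E ++ R)).count a with hn'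
              have hn : (X ++ a :: (C ++ b :: R)).count a = n' + 1 := by omega
              rw [hn] at hμ2
              have hkey : (n' + 1) * (n' + 1 + 1) = n' * (n' + 1) + (n' + 1) + (n' + 1) := by ring
              apply ih (n' * (n' + 1) + (n' + 1)) (by omega) f _ 0
                (Or.inl ⟨rfl, pvExpand_wf hX hC hR excl times⟩)
              · rw [if_pos rfl]
              · omega
          _ = scanGo excl a b times (X ++ a :: (C ++ b :: R)) none :=
              pvExpand_scan hb hX hC excl times

theorem pvSlice_from_eq_drop (xs : List String) (i : Int) :
    PySem.List.slice xs (some i) none =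
      xs.drop (if i < 0 then ((xs.length : Int) + i).toNat else i.toNat) := by
  by_cases hi : 0 ≤ i
  · obtain ⟨n, rfl⟩ : ∃ n : Nat, i = (n : Int) := ⟨i.toNat, by omega⟩
    rw [if_neg (by omega)]
    simpa using PySem.List.slice_from_natCast xs n
  · obtain ⟨k, rfl, hk⟩ : ∃ k : Nat, i = -(k : Int) ∧ 0 < k := ⟨(-i).toNat, by omega, by omega⟩
    rw [PySem.List.slice_from_neg_natCast xs k hk, if_pos (by omega)]
    congr 1
    omega

theorem kjwIndex_eq (s : List String) (c : String) (i : Int) :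
    kjwIndex s c i =
      (match pvIdxSearch c (s.drop (if i < 0 then ((s.length : Int) + i).toNat else i.toNat)) with
       | some j => (((if i < 0 then ((s.length : Int) + i).toNat else i.toNat) : Nat) : Int) + (j : Int)
       | none => -1) := rfl

theorem pvIdxSearch_count_lt {a : String} {D : List String} {i : Nat}
    (h : pvIdxSearch a D = some i) : (D.drop (i + 1)).count a < D.count a := by
  induction D generalizing i with
  | nil => simp [pvIdxSearch] at h
  | cons x r ih =>
    by_cases hx : x = a
    · subst hx
      rw [pvIdxSearch_cons_self] at h
      obtain rfl : (0 : Nat) = i := by simpa using h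
      simp [List.count_cons]
    · rw [pvIdxSearch_cons_ne hx] at h
      obtain ⟨j, hj, rfl⟩ := Option.map_eq_some_iff.1 h
      have := ih hj
      simp [List.count_cons, hx]
      omega

-- A returns the global strip whenever no closing token occurs: it only skips over openers
theorem volta_go_nob {a b : String} {note : List String} (hnb : b ∉ note)
    (excl : Bool) (times : Int) :
    ∀ (μ : Nat), ∀ (fuel : Nat) (idx : Int),
      (note.drop (if idx < 0 then ((note.length : Int) + idx).toNat else idx.toNat)).count a ≤ μ →
      μ < fuel →
      voltaGo excl a b times fuel note idx =
        note.filter (fun n => !(n == a || n == "|" || n == b)) := by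
  intro μ
  induction μ using Nat.strong_induction_on with
  | _ μ ih =>
  intro fuel idx hμ hfuel
  obtain ⟨f, rfl⟩ : ∃ f, fuel = f + 1 := ⟨fuel - 1, by omega⟩
  rw [voltaGo_succ, kjwIndex_notmem hnb idx, toMax_neg]
  cases hsearch : pvIdxSearch a (note.drop (if idx < 0 then ((note.length : Int) + idx).toNat else idx.toNat)) with
  | none =>
    rw [kjwIndex_eq, hsearch, toMax_neg, if_pos ⟨rfl, rfl⟩]
  | some i =>
    have hi := pvIdxSearch_lt hsearch
    rw [List.length_drop] at hi
    set st := (if idx < 0 then ((note.length : Int) + idx).toNat else idx.toNat) with hst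
    have hcast : (((st : Nat) : Int) + (i : Int)) = ((st + i : Nat) : Int) := by push_cast; ring
    rw [kjwIndex_eq, hsearch]
    simp only [hcast, ← hst]
    rw [toMax_natCast]
    rw [if_neg (by rintro ⟨h1, -⟩; omega), if_pos (Or.inr (by omega))]
    have h0 : st + i + 1 = st + (i + 1) := by omega
    have hdd : note.drop (st + i + 1) = (note.drop st).drop (i + 1) := by
      rw [List.drop_drop, h0]
    have hlt : (note.drop (st + i + 1)).count a < (note.drop st).count a := by
      rw [hdd]
      exact pvIdxSearch_count_lt hsearch
    apply ih ((note.drop (st + i + 1)).count a) (by omega) f (((st + i : Nat) : Int) + 1)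
    · have : (if (((st + i : Nat) : Int) + 1) < 0 then
          ((note.length : Int) + (((st + i : Nat) : Int) + 1)).toNat
        else (((st + i : Nat) : Int) + 1).toNat) = st + i + 1 := by
        rw [if_neg (by omega)]
        omega
      rw [this]
    · omega

-- B strips everything as well when no closing token occurs (the buffer is flushed at the end)
theorem scan_nob {a b : String} {T : List String} (hnb : b ∉ T) (excl : Bool) (times : Int) :
    ∀ st : Option (List String × List String × Bool),
      scanGo excl a b times T st =
        (match st with | none => ([] : List String) | some (bd, _, _) => bd) ++
          T.filter (fun n => !(n == a || n == "|" || n == b)) := by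
  induction T with
  | nil =>
    intro st
    rcases st with _ | ⟨bd, ld, bar⟩ <;> simp [scanGo]
  | cons x r ih =>
    simp only [List.mem_cons, not_or] at hnb
    have hxb : x ≠ b := Ne.symm hnb.1
    have ihr := ih hnb.2
    intro st
    rcases st with _ | ⟨bd, ld, bar⟩
    · by_cases hxa : x = a
      · subst hxa
        rw [scanGo_cons_none_a, ihr (some ([], [], false))]
        simp [List.filter_cons]
      · by_cases hbar : x = "|"
        · subst hbar
          rw [scanGo_cons_none_drop excl times hxa (Or.inl rfl), ihr none]
          simp [List.filter_cons]
        · rw [scanGo_cons_none_plain excl times hxa hbar hxb, ihr none]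
          simp [List.filter_cons, hxa, hbar, hxb]
    · by_cases hbar : x = "|"
      · subst hbar
        rw [show scanGo excl a b times ("|" :: r) (some (bd, ld, bar)) =
            scanGo excl a b times r (some (bd, ld, true)) by
          simp [scanGo, hxb], ihr (some (bd, ld, true))]
        simp [List.filter_cons]
      · by_cases hxa : x = a
        · have hab2 : a ≠ b := by rw [← hxa]; exact hxb
          have hbar2 : a ≠ "|" := by rw [← hxa]; exact hbar
          rw [show scanGo excl a b times (x :: r) (some (bd, ld, bar)) =
              scanGo excl a b times r (some (bd, ld, bar)) by
            simp [scanGo, hxa, hab2, hbar2], ihr (some (bd, ld, bar))]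
          simp [List.filter_cons, hxa]
        · rw [scanGo_cons_some_plain excl times hxa hbar hxb, ihr (some (bd ++ [x], if bar then ld else ld ++ [x], bar))]
          simp [List.filter_cons, hxa, hbar, hxb]

theorem volta_eq_filter {note : List String} {excl : Bool} {idx : Int} {a b : String}
    {times : Int} (hna : a ∉ note) (hnb : b ∉ note) :
    volta note excl idx a b times = note.filter (fun n => !(n == a || n == "|" || n == b)) := by
  unfold volta
  have hp : 0 < (note.length + 2) ^ 2 := pow_pos (by omega) 2
  obtain ⟨f, hf⟩ : ∃ f, (note.length + 2) ^ 2 = f + 1 := ⟨(note.length + 2) ^ 2 - 1, by omega⟩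
  rw [hf, voltaGo_succ, kjwIndex_notmem hna idx, kjwIndex_notmem hnb idx, toMax_neg,
    if_pos ⟨rfl, rfl⟩]

theorem volta_spec : Claim_equal_volta := by
  intro note excl idx a b times hdom hpre
  unfold Spec_volta volta_alt
  have hp : 0 < (note.length + 2) ^ 2 := pow_pos (by omega) 2
  have hsq : (note.length + 2) ^ 2 = note.length * (note.length + 1) + 3 * note.length + 4 := by
    ring
  rcases hpre with hnb | ⟨hna, hnbs⟩ | ⟨rfl, hab, ha, hb, hwf⟩
  · -- no closing token anywhere: both sides strip
    have hA : volta note excl idx a b times =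
        note.filter (fun n => !(n == a || n == "|" || n == b)) := by
      unfold volta
      have hcle : (note.drop (if idx < 0 then ((note.length : Int) + idx).toNat else idx.toNat)).count a ≤
          note.length := le_trans ((List.drop_sublist _ _).count_le a) List.count_le_length
      apply volta_go_nob hnb excl times note.length _ idx hcle
      have hmul : note.length ≤ note.length * (note.length + 1) := Nat.le_mul_of_pos_right _ (by omega)
      omega
    rw [hA, pvSlice_from_eq_drop]
    have hnbd : b ∉ note.drop (if idx < 0 then ((note.length : Int) + idx).toNat else idx.toNat) :=
      fun h => hnb (List.drop_subset _ _ h)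
    by_cases hga : a ∈ note.drop (if idx < 0 then ((note.length : Int) + idx).toNat else idx.toNat)
    · rw [if_neg (by simp [hga])]
      rw [scan_nob hnb excl times none]
      simp
    · rw [if_pos (by simp [hga, hnbd])]
  · -- neither delimiter in the searched suffix: first branch on both sides
    rw [pvSlice_from_eq_drop] at hnbs
    have hA : volta note excl idx a b times =
        note.filter (fun n => !(n == a || n == "|" || n == b)) := by
      unfold volta
      obtain ⟨f, hf⟩ : ∃ f, (note.length + 2) ^ 2 = f + 1 := ⟨(note.length + 2) ^ 2 - 1, by omega⟩
      rw [hf, voltaGo_succ, kjwIndex_notmem hna idx, toMax_neg, kjwIndex_eq,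
        pvIdxSearch_none hnbs, toMax_neg, if_pos ⟨rfl, rfl⟩]
    have hnas : a ∉ note.drop (if idx < 0 then ((note.length : Int) + idx).toNat else idx.toNat) :=
      fun h => hna (List.drop_subset _ _ h)
    rw [hA, pvSlice_from_eq_drop, if_pos (by simp [hnas, hnbs])]
  · have hsl : PySem.List.slice note (some (0 : Int)) none = note := by
      rw [show ((0 : Int)) = ((0 : Nat) : Int) by simp, PySem.List.slice_from_natCast]
      simp
    rw [hsl]
    by_cases hmem : a ∈ note ∨ b ∈ note
    · rw [if_neg (by rcases hmem with h | h <;> simp [h])]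
      unfold volta
      have hcl : note.count a ≤ note.length := List.count_le_length
      have hfuel : note.count a * (note.count a + 1) + (note.count a + 1) <
          (note.length + 2) ^ 2 := by
        have h1 : note.count a * (note.count a + 1) ≤ note.length * (note.length + 1) :=
          Nat.mul_le_mul hcl (by omega)
        omega
      apply volta_go_main excl a b times ha hb hab
        (note.count a * (note.count a + 1) + (note.count a + 1)) _ note 0
        (Or.inl ⟨rfl, hwf⟩)
      · rw [if_pos rfl]
      · exact hfuel
    · push_neg at hmem
      rw [if_pos (by simp [hmem.1, hmem.2])]
      exact volta_eq_filter hmem.1 hmem.2
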